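-- pv_equiv track=rewrite | github.com/seoyeon08/Algorithm_Study | programmers/Lev1/폰켓몬.py | solution
-- ===== SOURCE A (Python) =====
-- def solution(nums):
--     answer = 0
--     a = list()
--     for i in nums :
--         if len(a) < len(nums)//2 :
--             if i not in a :
--                 a.append(i)
--                 answer += 1
--         else : break
--     return answer
-- ===== SOURCE B (Python) =====
-- def solution(nums):
--     s = sorted(nums)
--     distinct = 0
--     prev = None
--     for x in s:
--         if prev is None or x != prev:
--             distinct += 1
--         prev = x
--     return min(distinct, len(nums) // 2)
-- ===== Notes on version B (the rewrite author's own statement) =====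
-- stated objective: faster
-- what changed: Counts distinct values by sorting once and a single adjacency pass instead of membership-testing a growing list with an early break; the final cap via min is kept.
import Mathlib
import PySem

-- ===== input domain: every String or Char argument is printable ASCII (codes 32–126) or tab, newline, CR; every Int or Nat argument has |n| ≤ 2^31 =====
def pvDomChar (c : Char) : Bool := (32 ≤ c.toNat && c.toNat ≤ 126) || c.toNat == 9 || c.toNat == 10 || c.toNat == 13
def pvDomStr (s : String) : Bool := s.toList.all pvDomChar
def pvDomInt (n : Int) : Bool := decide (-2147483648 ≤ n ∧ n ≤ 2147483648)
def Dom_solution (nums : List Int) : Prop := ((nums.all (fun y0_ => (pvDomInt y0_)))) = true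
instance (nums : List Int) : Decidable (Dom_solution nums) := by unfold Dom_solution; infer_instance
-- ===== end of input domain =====

-- B counts distinct values via sort + one adjacency pass instead of A's membership tests with early break; same return value.

-- ===== PORT A =====
-- loop over nums with state (answer, a); 'break' = returning answer once len(a) reaches cap
def solGoA (cap : Int) : List Int → Int → List Int → Int
  | [], answer, _ => answer
  | i :: rest, answer, a =>
    if (a.length : Int) < cap then
      if a.contains i then solGoA cap rest answer a
      else solGoA cap rest (answer + 1) (a ++ [i])
    else answer

def solution (nums : List Int) : Int :=
  solGoA (PySem.Int.floordiv (nums.length : Int) 2) nums 0 []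

-- ===== PORT B =====
-- fold over the sorted list with state (distinct, prev); increment unless prev == x
def solGoB : List Int → Int → Option Int → Int
  | [], d, _ => d
  | x :: r, d, prev => solGoB r (if prev = some x then d else d + 1) (some x)

def solution_alt (nums : List Int) : Int :=
  let s := PySem.List.sorted nums (fun x => x) false
  min (solGoB s 0 none) (PySem.Int.floordiv (nums.length : Int) 2)

-- ===== PRECONDITION & SPEC =====
def Spec_solution (nums : List Int) (out : Int) : Prop := out = solution_alt nums
instance (nums : List Int) (out : Int) : Decidable (Spec_solution nums out) := by unfold Spec_solution; infer_instance

-- ===== CLAIM (what is proved, stated in full; the proofs are below) =====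
def Claim_equal_solution : Prop := ∀ (nums : List Int), Dom_solution nums → Spec_solution nums (solution nums)

-- ===== LEMMAS AND PROOFS =====

-- (insert a t).card = (t.erase a).card + 1, unconditionally
theorem pv_card_insert_erase (a : Int) (t : Finset Int) :
    (insert a t).card = (t.erase a).card + 1 := by
  by_cases h : a ∈ t
  · rw [Finset.insert_eq_self.mpr h]
    exact (Finset.card_erase_add_one h).symm
  · rw [Finset.card_insert_of_notMem h, Finset.erase_eq_of_notMem h]

-- number of elements of l not already in a, counted without multiplicity (A's appends)
def newCount : List Int → List Int → Int
  | [], _ => 0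
  | i :: r, a => if a.contains i then newCount r a else 1 + newCount r (a ++ [i])

theorem newCount_eq (l : List Int) : ∀ a : List Int,
    newCount l a = ((l.toFinset \ a.toFinset).card : Int) := by
  induction l with
  | nil => intro a; simp [newCount]
  | cons i r ih =>
      intro a
      by_cases h : i ∈ a
      · have hc : a.contains i = true := by simpa using h
        simp only [newCount, hc, if_true, ih]
        rw [List.toFinset_cons, Finset.insert_sdiff_of_mem _ (by simpa using h)]
      · have hc : a.contains i = false := by simpa using h
        simp only [newCount, hc, Bool.false_eq_true, if_false, ih]
        have hnm : i ∉ a.toFinset := by simpa using h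
        have h1 : (a ++ [i]).toFinset = insert i a.toFinset := by
          ext x; simp
        have h2 : r.toFinset \ insert i a.toFinset = (r.toFinset \ a.toFinset).erase i := by
          ext x; simp; tauto
        rw [h1, h2, List.toFinset_cons, Finset.insert_sdiff_of_notMem _ hnm,
          pv_card_insert_erase]
        push_cast
        ring

theorem newCount_nonneg (l : List Int) (a : List Int) : 0 ≤ newCount l a := by
  rw [newCount_eq]; positivity

theorem solGoA_eq (cap : Int) (l : List Int) : ∀ (ans : Int) (a : List Int),
    (a.length : Int) ≤ cap →
    solGoA cap l ans a = ans + min (newCount l a) (cap - (a.length : Int)) := by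
  induction l with
  | nil =>
      intro ans a h
      have := newCount_nonneg ([] : List Int) a
      simp only [solGoA, newCount]
      omega
  | cons i r ih =>
      intro ans a h
      by_cases hlt : (a.length : Int) < cap
      · by_cases hc : i ∈ a
        · have hcb : a.contains i = true := by simpa using hc
          simp only [solGoA, if_pos hlt, hcb, if_true, newCount]
          exact ih ans a h
        · have hcb : a.contains i = false := by simpa using hc
          simp only [solGoA, if_pos hlt, hcb, Bool.false_eq_true, if_false, newCount]
          rw [ih (ans + 1) (a ++ [i]) (by simp; omega)]
          simp only [List.length_append, List.length_cons, List.length_nil]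
          have := newCount_nonneg r (a ++ [i])
          push_cast
          omega
      · have hge : (a.length : Int) = cap := by omega
        have := newCount_nonneg (i :: r) a
        simp only [solGoA, if_neg hlt]
        omega

theorem solGoB_some (s : List Int) : ∀ (d : Int) (p : Int),
    s.Pairwise (· ≤ ·) → (∀ y ∈ s, p ≤ y) →
    solGoB s d (some p) = d + ((s.toFinset.erase p).card : Int) := by
  induction s with
  | nil => intro d p _ _; simp [solGoB]
  | cons x r ih =>
      intro d p hp hle
      have hxr : ∀ y ∈ r, x ≤ y := by
        intro y hy; exact (List.pairwise_cons.mp hp).1 y hy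
      have hr : r.Pairwise (· ≤ ·) := (List.pairwise_cons.mp hp).2
      by_cases hx : x = p
      · subst hx
        simp only [solGoB, if_true]
        rw [ih d x hr hxr, List.toFinset_cons, Finset.erase_insert_eq_erase]
      · have hne : (some p ≠ some x) := by simpa using fun h => hx h.symm
        simp only [solGoB, if_neg hne]
        rw [ih (d + 1) x hr hxr]
        have hpx : p < x := lt_of_le_of_ne (hle x (by simp)) (fun h => hx h.symm)
        have hpn : p ∉ insert x r.toFinset := by
          simp only [Finset.mem_insert, List.mem_toFinset]
          rintro (h | h)
          · exact absurd h.symm hx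
          · exact absurd (hxr p h) (by omega)
        have he : (insert x r.toFinset).erase p = insert x r.toFinset :=
          Finset.erase_eq_of_notMem hpn
        rw [List.toFinset_cons, he, pv_card_insert_erase]
        push_cast
        ring

theorem solGoB_none (s : List Int) (h : s.Pairwise (· ≤ ·)) :
    solGoB s 0 none = (s.toFinset.card : Int) := by
  cases s with
  | nil => simp [solGoB]
  | cons x r =>
      have hxr : ∀ y ∈ r, x ≤ y := by
        intro y hy; exact (List.pairwise_cons.mp h).1 y hy
      have hr : r.Pairwise (· ≤ ·) := (List.pairwise_cons.mp h).2
      simp only [solGoB, reduceCtorEq, if_false]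
      rw [(by norm_num : (0:Int) + 1 = 1), solGoB_some r 1 x hr hxr, List.toFinset_cons, pv_card_insert_erase]
      push_cast
      ring

-- ===== VERDICT (by name: the statement is the Claim_ definition above) =====
theorem solution_spec : Claim_equal_solution := by
  intro nums _
  unfold Spec_solution solution solution_alt
  have hcap0 : 0 ≤ PySem.Int.floordiv (nums.length : Int) 2 := by
    rw [PySem.Int.floordiv_eq_ediv_of_pos (by omega)]
    positivity
  have hperm : (PySem.List.sorted nums (fun x => x) false).Perm nums :=
    PySem.List.sorted_perm nums (fun x => x) false
  have hfin : (PySem.List.sorted nums (fun x => x) false).toFinset = nums.toFinset :=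
    List.toFinset_eq_of_perm _ _ hperm
  have hpw : (PySem.List.sorted nums (fun x => x) false).Pairwise (· ≤ ·) := by
    simpa using PySem.List.sorted_pairwise nums (fun x => x)
  show solGoA _ nums 0 [] =
    min (solGoB (PySem.List.sorted nums (fun x => x) false) 0 none)
      (PySem.Int.floordiv (nums.length : Int) 2)
  rw [solGoA_eq _ nums 0 [] (by simpa using hcap0), newCount_eq, solGoB_none _ hpw, hfin]
  simp
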